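-- pv_equiv track=rewrite | github.com/agamjotsingh1/EE1080 | assignments/1/3_Agamjot.py | I_to_decimal
-- ===== SOURCE A (Python) =====
-- def I_to_decimal(I):
--     n = len(I)
--     N = len(I[0])
--
--     decimal_I = [] # Decimal I matrix, array of size (N x 1)
--
--     for j in range(N):
--         decimal = 0
--
--         # Converting the column to
--         for i in range(n):
--             if(I[i][j]):
--                 decimal += 2**i
--
--         decimal_I.append(decimal)
--
--     return decimal_I
-- ===== SOURCE B (Python) =====
-- def I_to_decimal(I):
--     N = len(I[0])
--     decimal_I = [0] * N
--     power = 1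
--     for row in I:
--         decimal_I = [d + (power if x else 0) for d, x in zip(decimal_I, row)]
--         power *= 2
--     return decimal_I
-- ===== Notes on version B (the rewrite author's own statement) =====
-- stated objective: faster
-- what changed: B makes a single row-major pass over the matrix, zipping each row into a running vector of column accumulators with a doubling power weight, instead of A's column-major nested index loops computing a fresh 2**i per set bit.
import Mathlib
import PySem

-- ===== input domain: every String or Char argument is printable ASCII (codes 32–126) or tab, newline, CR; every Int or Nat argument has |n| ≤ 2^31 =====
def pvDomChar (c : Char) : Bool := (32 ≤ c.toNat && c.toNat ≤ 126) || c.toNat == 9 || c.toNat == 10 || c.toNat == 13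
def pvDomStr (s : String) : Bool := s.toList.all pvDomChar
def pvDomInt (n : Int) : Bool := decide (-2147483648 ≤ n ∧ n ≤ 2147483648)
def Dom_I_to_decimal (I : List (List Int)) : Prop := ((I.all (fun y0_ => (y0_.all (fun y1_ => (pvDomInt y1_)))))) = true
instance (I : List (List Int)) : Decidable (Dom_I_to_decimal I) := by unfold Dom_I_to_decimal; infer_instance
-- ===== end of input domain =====

-- B replaces A's column-major nested loops (a fresh 2**i per set bit) by a single row-major
-- pass zipping each row into a vector of column accumulators with a doubling power weight.

-- ===== PORT A =====
-- for j in range(N): decimal = 0; for i in range(n): if I[i][j]: decimal += 2**i; append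
def I_to_decimal (I : List (List Int)) : List Int :=
  let n : Int := I.length
  let N : Int := ((PySem.List.pyGet? I 0).getD []).length
  (PySem.List.pyRange 0 N 1).foldl (fun acc j =>
    acc ++ [(PySem.List.pyRange 0 n 1).foldl (fun d i =>
      if (PySem.List.pyGet? ((PySem.List.pyGet? I i).getD []) j).getD 0 ≠ 0
      then d + 2 ^ i.toNat else d) 0]) []

-- ===== PORT B =====
-- one row step: decimal_I = [d + (power if x else 0) for d, x in zip(decimal_I, row)]; power *= 2
def pvAltStep (s : List Int × Int) (row : List Int) : List Int × Int :=
  (List.zipWith (fun d x => d + (if x ≠ 0 then s.2 else 0)) s.1 row, s.2 * 2)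

-- N = len(I[0]); decimal_I = [0]*N; power = 1; for row in I: <step>; return decimal_I
def I_to_decimal_alt (I : List (List Int)) : List Int :=
  let N : Nat := ((PySem.List.pyGet? I 0).getD []).length
  (I.foldl pvAltStep (List.replicate N 0, 1)).1

-- ===== PRECONDITION & SPEC =====
-- Pre_ excludes exactly the inputs where A raises IndexError: the empty matrix (I[0])
-- and matrices with some row shorter than the first row (I[i][j] out of range).
def Pre_I_to_decimal (I : List (List Int)) : Prop :=
  I ≠ [] ∧ ∀ row ∈ I, ((I.headD []).length ≤ row.length)
instance (I : List (List Int)) : Decidable (Pre_I_to_decimal I) := by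
  unfold Pre_I_to_decimal; infer_instance
def pvWitness_I_to_decimal : List (List Int) := [[1, 0, 1], [0, 1, 1]]
def Spec_I_to_decimal (I : List (List Int)) (out : List Int) : Prop := out = I_to_decimal_alt I
instance (I : List (List Int)) (out : List Int) : Decidable (Spec_I_to_decimal I out) := by unfold Spec_I_to_decimal; infer_instance

-- ===== CLAIM =====
def Claim_equal_I_to_decimal : Prop := ∀ (I : List (List Int)), Dom_I_to_decimal I → Pre_I_to_decimal I → Spec_I_to_decimal I (I_to_decimal I)

-- ===== LEMMAS AND PROOFS =====

-- reference value of column j: Horner from the front (row 0 carries weight 1)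
def pvColsum : List (List Int) → Int → Int
  | [], _ => 0
  | r :: rs, j =>
      (if (PySem.List.pyGet? r j).getD 0 ≠ 0 then 1 else 0) + 2 * pvColsum rs j

theorem pvColsum_append (rs : List (List Int)) (r : List Int) (j : Int) :
    pvColsum (rs ++ [r]) j
      = pvColsum rs j + 2 ^ rs.length * (if (PySem.List.pyGet? r j).getD 0 ≠ 0 then 1 else 0) := by
  induction rs with
  | nil => simp [pvColsum]
  | cons s ss ih => simp [pvColsum, ih, pow_succ]; split_ifs <;> ring

-- A's ascending power-sum over a column equals pvColsum
theorem pvA_col (rows : List (List Int)) (j : Int) :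
    (PySem.List.pyRange 0 (rows.length : Int) 1).foldl (fun d i =>
      if (PySem.List.pyGet? ((PySem.List.pyGet? rows i).getD []) j).getD 0 ≠ 0
      then d + 2 ^ i.toNat else d) 0 = pvColsum rows j := by
  induction rows using List.reverseRecOn with
  | nil => simp [pvColsum]
  | append_singleton rs r ih =>
    have hlen : ((rs ++ [r]).length : Int) = (rs.length : Int) + 1 := by simp
    rw [hlen, PySem.List.pyRange_one_succ_right (by positivity), List.foldl_append,
      List.foldl_cons, List.foldl_nil]
    have hbase : List.foldl (fun d i =>
        if (PySem.List.pyGet? ((PySem.List.pyGet? (rs ++ [r]) i).getD []) j).getD 0 ≠ 0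
        then d + 2 ^ i.toNat else d) 0 (PySem.List.pyRange 0 (rs.length : Int) 1)
        = pvColsum rs j := by
      refine Eq.trans (PySem.List.foldl_congr_mem _ _ (fun d i =>
        if (PySem.List.pyGet? ((PySem.List.pyGet? rs i).getD []) j).getD 0 ≠ 0
        then d + 2 ^ i.toNat else d) _ ?_) ih
      intro d i hi
      have hmem := PySem.List.mem_pyRange_one.mp hi
      have hg : PySem.List.pyGet? (rs ++ [r]) i = PySem.List.pyGet? rs i := by
        rw [PySem.List.pyGet?_of_nonneg _ hmem.1, PySem.List.pyGet?_of_nonneg _ hmem.1]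
        exact List.getElem?_append_left (by omega)
      rw [hg]
    rw [hbase]
    have hget : PySem.List.pyGet? (rs ++ [r]) ((rs.length : Nat) : Int) = some r := by
      simpa using PySem.List.pyGet?_append_length (pre := rs) (y := r) (ys := [])
    rw [pvColsum_append, hget]
    by_cases hb : (PySem.List.pyGet? r j).getD 0 ≠ 0 <;> simp [hb]

-- B's row-major fold computes acc[j] + p * pvColsum, column-wise
theorem pvB_fold (rows : List (List Int)) :
    ∀ (acc : List Int) (p : Int), (∀ r ∈ rows, acc.length ≤ r.length) →
    (rows.foldl pvAltStep (acc, p)).1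
      = (List.range acc.length).map (fun (j : Nat) => acc[j]! + p * pvColsum rows (j : Int)) := by
  induction rows with
  | nil =>
    intro acc p _
    apply List.ext_getElem (by simp)
    intro k h1 h2
    simp only [List.foldl_nil] at h1 ⊢
    rw [List.getElem_map, List.getElem_range]
    simp [pvColsum, List.getElem!_eq_getElem?_getD, List.getElem?_eq_getElem h1]
  | cons r rs ih =>
    intro acc p h
    have hr : acc.length ≤ r.length := h r (by simp)
    have hlen : (List.zipWith (fun d x => d + (if x ≠ 0 then p else 0)) acc r).length
        = acc.length := by simp [List.length_zipWith]; omega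
    rw [List.foldl_cons]
    show ((rs.foldl pvAltStep (List.zipWith (fun d x => d + (if x ≠ 0 then p else 0)) acc r, p * 2)).1) = _
    rw [ih _ (p * 2) (by intro s hs; rw [hlen]; exact h s (by simp [hs])), hlen]
    refine List.map_congr_left (fun j hj => ?_)
    have hj' : j < acc.length := by simpa using hj
    have hjr : j < r.length := lt_of_lt_of_le hj' hr
    have hz : (List.zipWith (fun d x => d + (if x ≠ 0 then p else 0)) acc r)[j]!
        = acc[j]! + (if r[j]! ≠ 0 then p else 0) := by
      rw [List.getElem!_eq_getElem?_getD, List.getElem?_eq_getElem (by omega),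
        List.getElem_zipWith, Option.getD_some,
        List.getElem!_eq_getElem?_getD, List.getElem?_eq_getElem hj',
        List.getElem!_eq_getElem?_getD, List.getElem?_eq_getElem hjr]
      simp
    rw [hz]
    have hget : (PySem.List.pyGet? r ((j : Nat) : Int)).getD 0 = r[j]! := by
      rw [PySem.List.pyGet?_natCast, List.getElem?_eq_getElem hjr,
        List.getElem!_eq_getElem?_getD, List.getElem?_eq_getElem hjr]
      simp
    rw [hz] at *
    simp only [pvColsum, hget]
    rcases eq_or_ne (r[j]!) 0 with hb | hb
    · rw [if_neg (not_not_intro hb), if_neg (not_not_intro hb)]; ring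
    · rw [if_pos hb, if_pos hb]; ring

-- ===== VERDICT =====
theorem I_to_decimal_spec : Claim_equal_I_to_decimal := by
  intro I _ hpre
  obtain ⟨hne, hrows⟩ := hpre
  obtain ⟨h, t, rfl⟩ : ∃ h t, I = h :: t := by
    cases I with
    | nil => exact absurd rfl hne
    | cons h t => exact ⟨h, t, rfl⟩
  unfold Spec_I_to_decimal I_to_decimal I_to_decimal_alt
  simp only [PySem.List.pyGet?_zero_cons, Option.getD_some]
  rw [PySem.List.foldl_append_singleton_eq_map, List.nil_append]
  rw [pvB_fold (h :: t) (List.replicate h.length 0) 1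
      (by intro r hr; simpa using hrows r hr)]
  simp only [List.length_replicate]
  rw [PySem.List.pyRange_one (a := 0) (b := (h.length : Int))]
  simp only [sub_zero, Int.toNat_natCast, List.map_map]
  refine List.map_congr_left (fun j hj => ?_)
  have hj' : j < h.length := by simpa using hj
  have hrep : (List.replicate h.length (0 : Int))[j]! = 0 := by
    rw [List.getElem!_eq_getElem?_getD, List.getElem?_eq_getElem (by simpa using hj')]
    simp
  simp only [Function.comp, hrep, zero_add, one_mul]
  exact pvA_col (h :: t) (j : Int)
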